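-- pv_equiv track=rewrite | github.com/druvolo1/plants_logs_server | app/services/posting_slots.py | find_best_slot
-- ===== SOURCE A (Python) =====
-- from typing import Optional, List, Dict
--
-- def find_best_slot(
--     assigned_slots: List[int],
--     window_duration: int,
--     target_device_count: int
-- ) -> int:
--     """
--     Find the best available slot to minimize gaps between devices.
--
--     Strategy:
--     1. If no slots assigned yet, start at minute 0
--     2. Otherwise, find the largest gap and place in the middle
--
--     Args:
--         assigned_slots: List of currently assigned minute offsets (sorted)
--         window_duration: Total window duration in minutes
--         target_device_count: Total number of devices that will need slots
--
--     Returns: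
--         Best available minute offset
--     """
--     if not assigned_slots:
--         # First device - start at the beginning
--         return 0
--
--     # Calculate ideal spacing between devices
--     ideal_spacing = window_duration / target_device_count
--
--     # Find the largest gap between consecutive slots
--     max_gap = 0
--     best_slot = 0
--
--     # Check gap before first slot
--     if assigned_slots[0] > max_gap:
--         max_gap = assigned_slots[0]
--         best_slot = assigned_slots[0] // 2
--
--     # Check gaps between consecutive slots
--     for i in range(len(assigned_slots) - 1):
--         gap = assigned_slots[i + 1] - assigned_slots[i]
--         if gap > max_gap:
--             max_gap = gap
--             # Place in middle of gap
--             best_slot = assigned_slots[i] + (gap // 2)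
--
--     # Check gap after last slot
--     last_gap = window_duration - assigned_slots[-1]
--     if last_gap > max_gap:
--         max_gap = last_gap
--         best_slot = assigned_slots[-1] + (last_gap // 2)
--
--     return best_slot
-- ===== SOURCE B (Python) =====
-- def find_best_slot(
--     assigned_slots,
--     window_duration,
--     target_device_count
-- ):
--     # First device - start at the beginning
--     if not assigned_slots:
--         return 0
--     # Staged computation: each gap runs from a start boundary to an end boundary.
--     starts = [0] + assigned_slots
--     ends = assigned_slots + [window_duration]
--     # Pass 1: the size of the largest gap (max of all boundary-to-boundary gaps).
--     max_gap = max(hi - lo for lo, hi in zip(starts, ends))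
--     if max_gap <= 0:
--         return 0
--     # Pass 2: locate the first gap of that size and take its midpoint.
--     best_lo = next(lo for lo, hi in zip(starts, ends) if hi - lo == max_gap)
--     return best_lo + max_gap // 2
-- ===== Notes on version B (the rewrite author's own statement) =====
-- stated objective: alternative
-- what changed: Replaces A's single-pass accumulator (running max_gap/best_slot updated across three separate cases: before-first, indexed middle loop, after-last) by staged passes over boundary pairs zip([0]+slots, slots+[window]): first a pure max() to get the largest gap size, then a first-match search for the gap of that size, then its midpoint; the unused ideal_spacing division is dropped, so Pre_ excludes the inputs where A raises ZeroDivisionError (non-empty slots with target_device_count==0), where B returns the largest-gap midpoint.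
import Mathlib
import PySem

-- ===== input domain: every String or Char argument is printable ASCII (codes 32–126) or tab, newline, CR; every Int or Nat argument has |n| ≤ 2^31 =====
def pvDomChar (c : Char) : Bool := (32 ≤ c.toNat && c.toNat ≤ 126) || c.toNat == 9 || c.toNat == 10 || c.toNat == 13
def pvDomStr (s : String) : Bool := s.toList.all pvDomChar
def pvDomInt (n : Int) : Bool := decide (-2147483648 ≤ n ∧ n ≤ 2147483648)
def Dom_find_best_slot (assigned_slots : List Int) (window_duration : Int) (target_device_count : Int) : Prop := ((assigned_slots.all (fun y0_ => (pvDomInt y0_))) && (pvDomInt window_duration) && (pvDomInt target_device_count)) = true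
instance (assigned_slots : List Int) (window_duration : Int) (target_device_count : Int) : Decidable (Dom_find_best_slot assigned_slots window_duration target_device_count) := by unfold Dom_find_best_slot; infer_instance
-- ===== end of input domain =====

-- B replaces A's single-pass running-max accumulator over three separate cases by staged
-- passes over boundary pairs: max() of all gaps first, then first-match search, then midpoint.

-- ===== PORT A =====
def find_best_slot (assigned_slots : List Int) (window_duration : Int) (target_device_count : Int) : Int :=
  if assigned_slots = [] then 0
  else
    -- ideal_spacing = window_duration / target_device_count : float, unused;
    -- its division raises ZeroDivisionError when target_device_count = 0 — excluded by Pre_.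
    let s0 := PySem.List.pyGetD assigned_slots 0 0
    let st0 : Int × Int := if s0 > 0 then (s0, PySem.Int.floordiv s0 2) else ((0 : Int), (0 : Int))
    let st1 := (PySem.List.pyRange 0 ((assigned_slots.length : Int) - 1)).foldl
      (fun (st : Int × Int) i =>
        let gap := PySem.List.pyGetD assigned_slots (i + 1) 0 - PySem.List.pyGetD assigned_slots i 0
        if gap > st.1 then (gap, PySem.List.pyGetD assigned_slots i 0 + PySem.Int.floordiv gap 2) else st) st0
    let last := PySem.List.pyGetD assigned_slots (-1) 0
    let last_gap := window_duration - last
    if last_gap > st1.1 then last + PySem.Int.floordiv last_gap 2 else st1.2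

-- ===== PORT B =====
def find_best_slot_alt (assigned_slots : List Int) (window_duration : Int) (target_device_count : Int) : Int :=
  if assigned_slots = [] then 0
  else
    let starts := (0 : Int) :: assigned_slots
    let ends := assigned_slots ++ [window_duration]
    match PySem.List.max? ((starts.zip ends).map (fun p => p.2 - p.1)) (fun y => y) with
    | none => 0      -- unreachable: the gap list is non-empty
    | some max_gap =>
      if max_gap ≤ 0 then 0
      else
        match (starts.zip ends).find? (fun p => p.2 - p.1 == max_gap) with
        | some p => p.1 + PySem.Int.floordiv max_gap 2
        | none => 0  -- next() would raise StopIteration; unreachable since max_gap is attained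

-- ===== PRECONDITION & SPEC =====
-- Pre_ excludes only the inputs where A raises ZeroDivisionError (non-empty slots with
-- target_device_count = 0, from the unused ideal_spacing division).
def Pre_find_best_slot (assigned_slots : List Int) (window_duration : Int) (target_device_count : Int) : Prop :=
  assigned_slots = [] ∨ target_device_count ≠ 0
instance (assigned_slots : List Int) (window_duration : Int) (target_device_count : Int) : Decidable (Pre_find_best_slot assigned_slots window_duration target_device_count) := by unfold Pre_find_best_slot; infer_instance

def pvWitness_find_best_slot : List Int × Int × Int := ([10, 30], 60, 3)

def Spec_find_best_slot (assigned_slots : List Int) (window_duration : Int) (target_device_count : Int) (out : Int) : Prop := out = find_best_slot_alt assigned_slots window_duration target_device_count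
instance (assigned_slots : List Int) (window_duration : Int) (target_device_count : Int) (out : Int) : Decidable (Spec_find_best_slot assigned_slots window_duration target_device_count out) := by unfold Spec_find_best_slot; infer_instance

-- ===== CLAIM (what is proved, stated in full; the proofs are below) =====
def Claim_equal_find_best_slot : Prop := ∀ (assigned_slots : List Int) (window_duration : Int) (target_device_count : Int), Dom_find_best_slot assigned_slots window_duration target_device_count → Pre_find_best_slot assigned_slots window_duration target_device_count → Spec_find_best_slot assigned_slots window_duration target_device_count (find_best_slot assigned_slots window_duration target_device_count)

-- ===== LEMMAS AND PROOFS =====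

-- A's accumulator step, as a function of the boundary pair it inspects (proof-side only).
def fbsStep (st : Int × Int) (p : Int × Int) : Int × Int :=
  let gap := p.2 - p.1
  if gap > st.1 then (gap, p.1 + PySem.Int.floordiv gap 2) else st

-- A's index loop, mapped to the pair each index reads, is exactly the consecutive-pair list.
lemma range_pairs_eq_zip (xs : List Int) :
    (List.range (xs.length - 1)).map (fun k => (xs.getD k 0, xs.getD (k + 1) 0)) = xs.zip xs.tail := by
  apply List.ext_getElem
  · simp
  · intro i h1 h2
    have hi : i < xs.length - 1 := by simpa using h1
    have hi1 : i + 1 < xs.length := by omega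
    simp [List.getElem_zip, List.getElem_tail, List.getElem?_eq_getElem hi1,
      Nat.lt_of_lt_of_le hi (Nat.sub_le _ _)]

-- Appending the right boundary to the ends appends one pair (from the last element).
lemma zip_ext_last : ∀ (xs : List Int) (h : xs ≠ []) (w : Int),
    xs.zip (xs.tail ++ [w]) = xs.zip xs.tail ++ [(xs.getLast h, w)]
  | [a], _, w => by simp
  | a :: b :: zs, _, w => by
    have ih := zip_ext_last (b :: zs) (by simp) w
    simp only [List.tail_cons] at ih
    simp only [List.tail_cons, List.cons_append, List.zip_cons_cons, ih]
    rw [List.getLast_cons (by simp : b :: zs ≠ [])]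

-- running max over the gaps of a pair list
def runMax (ps : List (Int × Int)) (g : Int) : Int := ps.foldl (fun a p => max a (p.2 - p.1)) g

lemma le_runMax : ∀ (ps : List (Int × Int)) (g : Int), g ≤ runMax ps g
  | [], g => le_refl g
  | p :: t, g => le_trans (le_max_left g (p.2 - p.1)) (le_runMax t (max g (p.2 - p.1)))

lemma runMax_mem : ∀ (ps : List (Int × Int)) (g : Int),
    runMax ps g = g ∨ ∃ p ∈ ps, p.2 - p.1 = runMax ps g
  | [], g => Or.inl rfl
  | p :: t, g => by
    have hM : runMax (p :: t) g = runMax t (max g (p.2 - p.1)) := rfl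
    rcases runMax_mem t (max g (p.2 - p.1)) with h | ⟨q, hq, hq2⟩
    · by_cases hle : p.2 - p.1 ≤ g
      · left; rw [hM, h]; omega
      · right; exact ⟨p, List.mem_cons_self, by rw [hM, h]; omega⟩
    · right; exact ⟨q, List.mem_cons_of_mem _ hq, by rw [hM]; exact hq2⟩

lemma find?_gap_some (ps : List (Int × Int)) (M : Int) (h : ∃ p ∈ ps, p.2 - p.1 = M) :
    ∃ q, ps.find? (fun p => p.2 - p.1 == M) = some q := by
  rcases h with ⟨p, hp, he⟩
  have : (ps.find? (fun p => p.2 - p.1 == M)).isSome := by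
    rw [List.find?_isSome]
    exact ⟨p, hp, by simpa using he⟩
  rcases ho : ps.find? (fun p => p.2 - p.1 == M) with _ | q
  · rw [ho] at this; simp at this
  · exact ⟨q, ho⟩

lemma fold_fst : ∀ (ps : List (Int × Int)) (g b : Int), (ps.foldl fbsStep (g, b)).1 = runMax ps g
  | [], g, b => rfl
  | p :: t, g, b => by
    simp only [List.foldl_cons, fbsStep, runMax]
    by_cases h : p.2 - p.1 > g
    · rw [if_pos h]
      have : max g (p.2 - p.1) = p.2 - p.1 := by omega
      rw [this]; exact fold_fst t _ _
    · rw [if_neg h]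
      have : max g (p.2 - p.1) = g := by omega
      rw [this]; exact fold_fst t _ _

-- The accumulator's recorded slot is the midpoint of the FIRST gap attaining the final max.
lemma fold_snd : ∀ (ps : List (Int × Int)) (g b : Int),
    (ps.foldl fbsStep (g, b)).2 =
      if runMax ps g > g then
        match ps.find? (fun p => p.2 - p.1 == runMax ps g) with
        | some p => p.1 + PySem.Int.floordiv (runMax ps g) 2
        | none => b
      else b
  | [], g, b => by simp [runMax]
  | p :: t, g, b => by
    have hM : runMax (p :: t) g = runMax t (max g (p.2 - p.1)) := rfl
    by_cases h : p.2 - p.1 > g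
    · have hmx : max g (p.2 - p.1) = p.2 - p.1 := by omega
      have ih := fold_snd t (p.2 - p.1) (p.1 + PySem.Int.floordiv (p.2 - p.1) 2)
      have hge := le_runMax t (p.2 - p.1)
      simp only [List.foldl_cons, fbsStep, if_pos h, hM, hmx] at *
      by_cases h2 : runMax t (p.2 - p.1) > p.2 - p.1
      · rw [ih, if_pos h2, if_pos (by omega), List.find?_cons_of_neg (by simp; omega)]
        obtain ⟨q, hq⟩ := find?_gap_some t (runMax t (p.2 - p.1))
          (by
            rcases runMax_mem t (p.2 - p.1) with h3 | h3
            · omega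
            · exact h3)
        rw [hq]
      · have heq : runMax t (p.2 - p.1) = p.2 - p.1 := by omega
        rw [ih, if_neg h2, if_pos (by omega), heq,
          List.find?_cons_of_pos (by simp)]
    · have hmx : max g (p.2 - p.1) = g := by omega
      have ih := fold_snd t g b
      simp only [List.foldl_cons, fbsStep, if_neg h, hM, hmx] at *
      by_cases h2 : runMax t g > g
      · rw [ih, if_pos h2, if_pos h2, List.find?_cons_of_neg (by simp; omega)]
      · rw [ih, if_neg h2, if_neg h2]
    termination_by ps => ps.length

lemma runMax_eq_map (ps : List (Int × Int)) : ∀ (g : Int),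
    runMax ps g = (ps.map (fun p => p.2 - p.1)).foldl max g := by
  induction ps with
  | nil => intro g; rfl
  | cons p t ih =>
    intro g
    simp only [runMax, List.foldl_cons, List.map_cons] at *
    exact ih _

lemma foldl_max_init (l : List Int) : ∀ (a b : Int), l.foldl max (max a b) = max a (l.foldl max b) := by
  induction l with
  | nil => intro a b; rfl
  | cons x t ih =>
    intro a b
    simp only [List.foldl_cons, max_assoc]
    exact ih a (max b x)

theorem find_best_slot_spec : Claim_equal_find_best_slot := by
  intro xs w t _ _
  unfold Spec_find_best_slot find_best_slot find_best_slot_alt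
  cases hxs : xs with
  | nil => simp
  | cons s rest =>
    simp only [if_neg (by simp : s :: rest ≠ [])]
    have hne : s :: rest ≠ [] := by simp
    -- the boundary-pair list, in cons/append form
    have hzip : ((0 : Int) :: (s :: rest)).zip ((s :: rest) ++ [w])
        = ((0 : Int), s) :: ((s :: rest).zip (s :: rest).tail ++ [((s :: rest).getLast hne, w)]) := by
      have h2 := zip_ext_last (s :: rest) hne w
      simp only [List.tail_cons] at h2
      calc ((0 : Int) :: (s :: rest)).zip ((s :: rest) ++ [w])
          = ((0 : Int), s) :: (s :: rest).zip (rest ++ [w]) := by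
            simp only [List.cons_append, List.zip_cons_cons]
        _ = _ := by rw [h2]; simp
    set ps := ((0 : Int), s) :: ((s :: rest).zip (s :: rest).tail ++ [((s :: rest).getLast hne, w)]) with hps
    -- A is the fbsStep fold over ps, projected
    have hn : ((s :: rest).length : Int) - 1 = (((s :: rest).length - 1 : Nat) : Int) := by simp
    have hloop : ∀ st : Int × Int,
        (PySem.List.pyRange 0 (((s :: rest).length : Int) - 1)).foldl
          (fun (st : Int × Int) i =>
            let gap := PySem.List.pyGetD (s :: rest) (i + 1) 0 - PySem.List.pyGetD (s :: rest) i 0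
            if gap > st.1 then (gap, PySem.List.pyGetD (s :: rest) i 0 + PySem.Int.floordiv gap 2) else st) st
        = ((s :: rest).zip (s :: rest).tail).foldl fbsStep st := by
      intro st
      rw [hn, PySem.List.pyRange_zero_natCast, List.foldl_map]
      rw [← range_pairs_eq_zip (s :: rest), List.foldl_map]
      apply PySem.List.foldl_congr_mem
      intro a b hb
      have h1 : PySem.List.pyGetD (s :: rest) ((b : Int) + 1) 0 = (s :: rest).getD (b + 1) 0 := by
        have : ((b : Int) + 1) = ((b + 1 : Nat) : Int) := by push_cast; ring
        rw [this, PySem.List.pyGetD_natCast]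
      simp [fbsStep, h1, PySem.List.pyGetD_natCast]
    have hfirst : fbsStep ((0 : Int), (0 : Int)) ((0 : Int), s)
        = (if PySem.List.pyGetD (s :: rest) 0 0 > 0
          then (PySem.List.pyGetD (s :: rest) 0 0, PySem.Int.floordiv (PySem.List.pyGetD (s :: rest) 0 0) 2)
          else ((0 : Int), (0 : Int))) := by
      simp [fbsStep, PySem.List.pyGetD]
    have hlast : PySem.List.pyGetD (s :: rest) (-1) 0 = (s :: rest).getLast hne :=
      PySem.List.pyGetD_neg_one _ 0 hne
    have hA : (if w - PySem.List.pyGetD (s :: rest) (-1) 0 >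
          ((PySem.List.pyRange 0 (((s :: rest).length : Int) - 1)).foldl
            (fun (st : Int × Int) i =>
              let gap := PySem.List.pyGetD (s :: rest) (i + 1) 0 - PySem.List.pyGetD (s :: rest) i 0
              if gap > st.1 then (gap, PySem.List.pyGetD (s :: rest) i 0 + PySem.Int.floordiv gap 2) else st)
            (if PySem.List.pyGetD (s :: rest) 0 0 > 0
              then (PySem.List.pyGetD (s :: rest) 0 0, PySem.Int.floordiv (PySem.List.pyGetD (s :: rest) 0 0) 2)
              else ((0 : Int), (0 : Int)))).1
        then PySem.List.pyGetD (s :: rest) (-1) 0 +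
          PySem.Int.floordiv (w - PySem.List.pyGetD (s :: rest) (-1) 0) 2
        else ((PySem.List.pyRange 0 (((s :: rest).length : Int) - 1)).foldl
            (fun (st : Int × Int) i =>
              let gap := PySem.List.pyGetD (s :: rest) (i + 1) 0 - PySem.List.pyGetD (s :: rest) i 0
              if gap > st.1 then (gap, PySem.List.pyGetD (s :: rest) i 0 + PySem.Int.floordiv gap 2) else st)
            (if PySem.List.pyGetD (s :: rest) 0 0 > 0
              then (PySem.List.pyGetD (s :: rest) 0 0, PySem.Int.floordiv (PySem.List.pyGetD (s :: rest) 0 0) 2)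
              else ((0 : Int), (0 : Int)))).2)
        = (ps.foldl fbsStep ((0 : Int), (0 : Int))).2 := by
      rw [hps]
      simp only [List.foldl_cons, List.foldl_append, List.foldl_nil]
      rw [hfirst, hloop, hlast]
      simp only [fbsStep]
      split_ifs <;> rfl
    simp only [hA]
    -- B, rewritten on the same pair list
    rw [hzip.symm] at *
    -- gaps list is non-empty: expose head and tail for max?_id_cons
    have hcons : (((0 : Int) :: (s :: rest)).zip ((s :: rest) ++ [w])).map (fun p => p.2 - p.1)
        = (s - 0) :: (((s :: rest).zip (rest ++ [w])).map (fun p => p.2 - p.1)) := by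
      simp [List.zip_cons_cons]
    -- run both characterizations
    rw [fold_snd]
    have hrm : runMax (((0 : Int) :: (s :: rest)).zip ((s :: rest) ++ [w])) 0
        = max 0 ((((s :: rest).zip (rest ++ [w])).map (fun p => p.2 - p.1)).foldl max (s - 0)) := by
      rw [runMax_eq_map, hcons]
      simp only [List.foldl_cons]
      exact foldl_max_init _ 0 (s - 0)
    have hmaxq : PySem.List.max? ((((0 : Int) :: (s :: rest)).zip ((s :: rest) ++ [w])).map (fun p => p.2 - p.1)) (fun y => y)
        = some ((((s :: rest).zip (rest ++ [w])).map (fun p => p.2 - p.1)).foldl max (s - 0)) := by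
      rw [hcons]; exact PySem.List.max?_id_cons _ _
    rw [hmaxq]
    dsimp only
    set m := (((s :: rest).zip (rest ++ [w])).map (fun p => p.2 - p.1)).foldl max (s - 0) with hm
    by_cases hpos : m ≤ 0
    · have hnp : ¬ runMax (((0 : Int) :: (s :: rest)).zip ((s :: rest) ++ [w])) 0 > 0 := by
        rw [hrm]; omega
      rw [if_neg hnp, if_pos hpos]
    · have hrm' : runMax (((0 : Int) :: (s :: rest)).zip ((s :: rest) ++ [w])) 0 = m := by
        rw [hrm]; omega
      rw [hrm', if_pos (by omega), if_neg hpos]
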